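-- pv_equiv track=rewrite | github.com/krsatyam7/niet_codetantra | Competitive Coding - 1/2. Problems on Strings/Q2.py | isPrimeLengthPalindrome
-- ===== SOURCE A (Python) =====
-- def isPrimeLengthPalindrome(s):
-- 	# write code from here
-- 	n=len(s)
-- 	rev=""
-- 	flag=0
-- 	if n>1:
-- 		for i in range(2,n):
-- 			if n%i==0:
-- 				flag=1
-- 				break
-- 	if flag==1:
-- 		return False
-- 	else:
-- 		for i in s:
-- 			rev=i+rev
-- 		if rev==s and flag==0:
-- 			return True
-- 		else:
-- 			return False
-- ===== SOURCE B (Python) =====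
-- def isPrimeLengthPalindrome(s):
--     n = len(s)
--     if n > 1:
--         d = 2
--         while d * d <= n:
--             if n % d == 0:
--                 return False
--             d += 1
--     i, j = 0, n - 1
--     while i < j:
--         if s[i] != s[j]:
--             return False
--         i += 1
--         j -= 1
--     return True
-- ===== Notes on version B (the rewrite author's own statement) =====
-- stated objective: alternative
-- what changed: Trial division stops at sqrt(n) instead of scanning all of 2..n-1, and the palindrome test is a two-pointer scan with early exit instead of building the full reversed string and comparing.
import Mathlib
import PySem

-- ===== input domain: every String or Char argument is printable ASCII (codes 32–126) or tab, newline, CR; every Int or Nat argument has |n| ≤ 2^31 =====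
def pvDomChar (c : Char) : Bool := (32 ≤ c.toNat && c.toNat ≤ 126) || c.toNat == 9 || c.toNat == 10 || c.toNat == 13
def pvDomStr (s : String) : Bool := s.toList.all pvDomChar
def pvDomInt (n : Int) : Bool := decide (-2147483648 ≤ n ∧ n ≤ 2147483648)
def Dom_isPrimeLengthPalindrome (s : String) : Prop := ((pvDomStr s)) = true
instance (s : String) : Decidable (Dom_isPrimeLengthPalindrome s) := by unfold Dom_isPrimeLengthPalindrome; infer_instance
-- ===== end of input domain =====

-- B replaces A's full 2..n-1 trial division with trial division up to sqrt(n) and the reverse-then-compare palindrome test with an early-exit two-pointer scan; same return value everywhere.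


-- ===== PORT A =====
-- Loop 'for i in range(2,n): if n%i==0: flag=1; break' — flag after the loop.
def aFlagLoop (n : Nat) : List Nat → Nat
  | [] => 0
  | i :: rest => if n % i == 0 then 1 else aFlagLoop n rest

-- flag as A computes it: 0 unless the scan over range(2,n) finds a divisor.
def aFlag (n : Nat) : Nat := if n > 1 then aFlagLoop n (List.range' 2 (n - 2)) else 0

-- Port of A: full trial division over range(2,n), then build rev by prepending and compare.
def isPrimeLengthPalindrome (s : String) : Bool :=
  if aFlag s.toList.length == 1 then false
  else if s.toList.foldl (fun rev c => c :: rev) [] = s.toList ∧ aFlag s.toList.length == 0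
  then true else false

-- ===== PORT B =====
-- 'while d*d <= n: if n % d == 0: return False; d += 1'
def bTrial (n d : Nat) : Bool :=
  if h : d * d ≤ n then
    if n % d == 0 then false else bTrial n (d + 1)
  else true
termination_by n + 1 - d
decreasing_by
  have : d ≤ n := by nlinarith
  omega

-- 'while i < j: if s[i] != s[j]: return False; i += 1; j -= 1' (indices always in range)
def bPal (l : List Char) (i j : Nat) : Bool :=
  if i < j then
    if l.getD i ' ' != l.getD j ' ' then false else bPal l (i + 1) (j - 1)
  else true
termination_by j - i

-- Port of B: trial division only up to sqrt(n), two-pointer palindrome scan.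
def isPrimeLengthPalindrome_alt (s : String) : Bool :=
  if s.toList.length > 1 ∧ bTrial s.toList.length 2 = false then false
  else bPal s.toList 0 (s.toList.length - 1)

-- ===== PRECONDITION & SPEC =====
def Spec_isPrimeLengthPalindrome (s : String) (out : Bool) : Prop := out = isPrimeLengthPalindrome_alt s
instance (s : String) (out : Bool) : Decidable (Spec_isPrimeLengthPalindrome s out) := by unfold Spec_isPrimeLengthPalindrome; infer_instance

-- ===== CLAIM (what is proved, stated in full; the proofs are below) =====
def Claim_equal_isPrimeLengthPalindrome : Prop := ∀ (s : String), Dom_isPrimeLengthPalindrome s → Spec_isPrimeLengthPalindrome s (isPrimeLengthPalindrome s)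

-- ===== LEMMAS AND PROOFS =====

theorem aFlagLoop_eq_zero (n : Nat) (l : List Nat) :
    aFlagLoop n l = 0 ↔ ∀ i ∈ l, n % i ≠ 0 := by
  induction l with
  | nil => simp [aFlagLoop]
  | cons i rest ih =>
    by_cases h : n % i = 0
    · refine iff_of_false (by simp [aFlagLoop, h]) ?_
      push_neg
      exact ⟨i, List.mem_cons_self, h⟩
    · simp only [aFlagLoop, List.mem_cons]
      rw [if_neg (by simp [h]), ih]
      constructor
      · rintro hr k (rfl | hk)
        · exact h
        · exact hr k hk
      · intro hr k hk
        exact hr k (Or.inr hk)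

theorem aFlagLoop_zero_or_one (n : Nat) (l : List Nat) :
    aFlagLoop n l = 0 ∨ aFlagLoop n l = 1 := by
  induction l with
  | nil => simp [aFlagLoop]
  | cons i rest ih =>
    simp only [aFlagLoop]
    split
    · exact Or.inr rfl
    · exact ih

theorem bTrial_eq_true (n d : Nat) :
    bTrial n d = true ↔ ∀ m, d ≤ m → m * m ≤ n → n % m ≠ 0 := by
  fun_induction bTrial n d with
  | case1 d hle hmod =>
    refine iff_of_false (by simp) ?_
    push_neg
    exact ⟨d, le_refl d, hle, by simpa using hmod⟩
  | case2 d hle hmod ih =>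
    rw [ih]
    constructor
    · intro hr m hdm hmm
      rcases Nat.eq_or_lt_of_le hdm with rfl | hlt
      · simpa using hmod
      · exact hr m hlt hmm
    · intro hr m hdm hmm
      exact hr m (Nat.le_of_succ_le hdm) hmm
  | case3 d hgt =>
    refine iff_of_true rfl ?_
    intro m hdm hmm hz
    have : d * d ≤ m * m := Nat.mul_le_mul hdm hdm
    omega

theorem trial_bridge (n : Nat) (h2 : 2 ≤ n) :
    (∀ i ∈ List.range' 2 (n - 2), n % i ≠ 0) ↔ (∀ m, 2 ≤ m → m * m ≤ n → n % m ≠ 0) := by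
  constructor
  · intro h m h2m hmm
    by_cases hlt : m < n
    · exact h m (by rw [List.mem_range'_1]; omega)
    · intro hz
      nlinarith
  · intro h i hi hz
    rw [List.mem_range'_1] at hi
    obtain ⟨h2i, hin'⟩ := hi
    have hin : i < n := by omega
    obtain ⟨q, hq⟩ := Nat.dvd_of_mod_eq_zero hz
    have hq2 : 2 ≤ q := by
      rcases Nat.lt_or_ge q 2 with h' | h'
      · interval_cases q <;> omega
      · exact h'
    by_cases hii : i * i ≤ n
    · exact h i h2i hii hz
    · push_neg at hii
      have hqi : q < i := by nlinarith
      have hqq : q * q ≤ n := by nlinarith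
      have hqz : n % q = 0 := by rw [hq, Nat.mul_mod_left]
      exact h q hq2 hqq hqz

theorem foldl_cons_rev (l acc : List Char) :
    l.foldl (fun rev c => c :: rev) acc = l.reverse ++ acc := by
  induction l generalizing acc with
  | nil => simp
  | cons c t ih => simp [List.foldl, ih]

theorem bPal_iff (l : List Char) (i j : Nat) :
    bPal l i j = true ↔ ∀ k, i ≤ k → 2 * k < i + j → l.getD k ' ' = l.getD (i + j - k) ' ' := by
  fun_induction bPal l i j with
  | case1 i j hij hne =>
    refine iff_of_false (by simp) ?_
    push_neg
    refine ⟨i, le_refl i, by omega, ?_⟩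
    have : i + j - i = j := by omega
    rw [this]
    simpa using hne
  | case2 i j hij heq ih =>
    have hsum : i + 1 + (j - 1) = i + j := by omega
    rw [ih]
    constructor
    · intro hr k hik hk
      rcases Nat.eq_or_lt_of_le hik with heq2 | hlt
      · subst heq2
        rw [show i + j - i = j from by omega]
        simpa using heq
      · have := hr k (by omega) (by omega)
        rwa [hsum] at this
    · intro hr k hik hk
      have := hr k (by omega) (by omega)
      rwa [hsum]
  | case3 i j hij =>
    refine iff_of_true rfl ?_
    intro k hk hk2
    omega

theorem reverse_half (l : List Char)
    (h : ∀ k, 2 * k < l.length - 1 → l.getD k ' ' = l.getD (l.length - 1 - k) ' ') :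
    l.reverse = l := by
  apply List.ext_getElem (by simp)
  intro k h1 h2
  rw [List.getElem_reverse]
  rw [← List.getD_eq_getElem l ' ' (by omega), ← List.getD_eq_getElem l ' ' h2]
  rcases lt_trichotomy (2 * k) (l.length - 1) with hk | hk | hk
  · exact (h k hk).symm
  · rw [show l.length - 1 - k = k by omega]
  · have h3 := h (l.length - 1 - k) (by omega)
    rw [show l.length - 1 - (l.length - 1 - k) = k by omega] at h3
    exact h3

theorem half_of_reverse (l : List Char) (h : l.reverse = l) :
    ∀ k, 2 * k < l.length - 1 → l.getD k ' ' = l.getD (l.length - 1 - k) ' ' := by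
  intro k hk
  rw [List.getD_eq_getElem?_getD, List.getD_eq_getElem?_getD]
  conv_lhs => rw [← h]
  rw [show (l.reverse[k]?) = l[l.length - 1 - k]? from
    List.getElem?_reverse (by omega : k < l.length)]

theorem pal_eq (l : List Char) :
    (decide (l.reverse = l)) = bPal l 0 (l.length - 1) := by
  rcases hb : bPal l 0 (l.length - 1) with _ | _
  · simp only [decide_eq_false_iff_not]
    intro hrev
    have hcon := (bPal_iff l 0 (l.length - 1)).not.mp (by simp [hb])
    push_neg at hcon
    obtain ⟨k, _, hk2, hne⟩ := hcon
    exact hne (by simpa using half_of_reverse l hrev k (by omega))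
  · simp only [decide_eq_true_iff]
    have hh := (bPal_iff l 0 (l.length - 1)).mp hb
    exact reverse_half l (fun k hk => by simpa using hh k (Nat.zero_le k) (by omega))

-- ===== VERDICT (by name: the statement is the Claim_ definition above) =====
theorem isPrimeLengthPalindrome_spec : Claim_equal_isPrimeLengthPalindrome := by
  intro s _
  unfold Spec_isPrimeLengthPalindrome isPrimeLengthPalindrome isPrimeLengthPalindrome_alt
  generalize s.toList = l
  rw [foldl_cons_rev, List.append_nil]
  by_cases hn1 : l.length > 1
  · rcases aFlagLoop_zero_or_one l.length (List.range' 2 (l.length - 2)) with hf | hf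
    · -- A finds no divisor in 2..n-1, so B finds none up to sqrt either
      have hflag : aFlag l.length = 0 := by simp [aFlag, hn1, hf]
      have hb : bTrial l.length 2 = true :=
        (bTrial_eq_true l.length 2).mpr ((trial_bridge l.length (by omega)).mp
          ((aFlagLoop_eq_zero l.length (List.range' 2 (l.length - 2))).mp hf))
      rw [hflag, if_neg (show ¬(((0:Nat) == 1) = true) by decide),
        if_neg (show ¬(l.length > 1 ∧ bTrial l.length 2 = false) by simp [hb]), ← pal_eq]
      by_cases hp : l.reverse = l <;> simp [hp]
    · -- A finds a divisor, so B must also find one (not above sqrt only)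
      have hflag : aFlag l.length = 1 := by simp [aFlag, hn1, hf]
      have hnd : ¬ ∀ i ∈ List.range' 2 (l.length - 2), l.length % i ≠ 0 := by
        intro hc
        rw [(aFlagLoop_eq_zero l.length (List.range' 2 (l.length - 2))).mpr hc] at hf
        omega
      have hb : bTrial l.length 2 = false := by
        rcases hbb : bTrial l.length 2 with _ | _
        · rfl
        · exact absurd ((trial_bridge l.length (by omega)).mpr
            ((bTrial_eq_true l.length 2).mp hbb)) hnd
      rw [hflag, if_pos (show (((1:Nat) == 1) = true) from rfl),
        if_pos (show l.length > 1 ∧ bTrial l.length 2 = false from ⟨hn1, hb⟩)]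
  · -- length 0 or 1: A's flag is 0 and B skips trial division
    have hflag : aFlag l.length = 0 := by simp [aFlag, hn1]
    rw [hflag, if_neg (show ¬(((0:Nat) == 1) = true) by decide),
      if_neg (show ¬(l.length > 1 ∧ bTrial l.length 2 = false) by simp [hn1]), ← pal_eq]
    by_cases hp : l.reverse = l <;> simp [hp]
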